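-- pv_equiv track=rewrite | github.com/jeongminllee/ProgrammersCodeTest | 백준/Gold/18436. 수열과 쿼리 37/수열과 쿼리 37.py | query
-- ===== SOURCE A (Python) =====
-- def query(tree, node, start, end, left, right) :
--     if left > end or right < start :
--         return [0, 0]
--     if left <= start and end <= right :
--         return tree[node]
--     l = query(tree, node*2, start, (start+end)//2, left, right)
--     r = query(tree, node*2+1, (start+end)//2+1, end, left, right)
--
--     return [l[0] + r[0], l[1] + r[1]]
-- ===== SOURCE B (Python) =====
-- def query(tree, node, start, end, left, right):
--     # Iterative version: explicit stack of (node, start, end) frames and a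
--     # running accumulator instead of recursive descent with pairwise merges.
--     res = [0, 0]
--     stack = [(node, start, end)]
--     while stack:
--         f, s, e = stack.pop()
--         if left > e or right < s:
--             continue
--         if left <= s and e <= right:
--             res[0] += tree[f][0]
--             res[1] += tree[f][1]
--             continue
--         mid = (s + e) // 2
--         stack.append((f * 2, s, mid))
--         stack.append((f * 2 + 1, mid + 1, e))
--     return res
-- ===== Notes on version B (the rewrite author's own statement) =====
-- stated objective: alternative
-- what changed: Replaces the recursive descent with pairwise [l0+r0,l1+r1] merges by an iterative explicit-stack traversal that adds each fully-covered node's pair into a single running accumulator; …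
-- outside the precondition, e.g. on query([[9], [1, 2, 3]], 1, 0, 0, 0, 0): A returns [1, 2, 3], B returns [1, 2]; on query([[0, 0], [1, 2], [3, 4], [5, 6]], 1, 0, 2, 0, 1): A returns [3, 4], B returns [3, 4]; on query([[], [1, 2], [3, 4], [5, 6]], 1, 0, 1, 0, 0): A returns [3, 4], B returns [3, 4]
import Mathlib
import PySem

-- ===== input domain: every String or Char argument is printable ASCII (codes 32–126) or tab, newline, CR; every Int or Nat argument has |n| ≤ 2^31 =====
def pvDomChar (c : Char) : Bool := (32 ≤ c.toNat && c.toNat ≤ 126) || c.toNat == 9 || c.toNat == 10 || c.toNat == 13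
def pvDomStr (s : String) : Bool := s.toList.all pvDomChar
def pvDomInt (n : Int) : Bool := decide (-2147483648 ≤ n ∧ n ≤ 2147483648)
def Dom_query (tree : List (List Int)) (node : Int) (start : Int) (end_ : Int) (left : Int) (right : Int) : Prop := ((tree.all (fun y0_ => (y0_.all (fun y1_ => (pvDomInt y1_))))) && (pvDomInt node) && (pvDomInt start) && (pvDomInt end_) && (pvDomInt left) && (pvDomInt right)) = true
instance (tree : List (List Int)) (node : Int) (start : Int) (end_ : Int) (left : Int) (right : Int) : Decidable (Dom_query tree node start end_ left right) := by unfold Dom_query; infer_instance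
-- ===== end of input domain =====

-- B replaces the recursive descent with pairwise merges by an iterative explicit-stack
-- traversal accumulating into one running pair (same asymptotic cost, different decomposition).

-- ===== PORT A =====
-- Literal port of A's recursion; 'tree[node]' is PySem.List.pyGet? (the none/IndexError
-- case, unreachable under Pre_query, is defaulted). The Nat fuel only totalizes the
-- recursion: the depth is at most (end_-start).toNat, so the 0-fuel branch is never hit.
def queryFuel (tree : List (List Int)) (left right : Int) : Nat → Int → Int → Int → List Int
  | 0, _, _, _ => [0, 0]
  | fuel + 1, node, start, end_ =>
    if left > end_ ∨ right < start then [0, 0]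
    else if left ≤ start ∧ end_ ≤ right then (PySem.List.pyGet? tree node).getD []
    else
      let l := queryFuel tree left right fuel (node * 2) start (PySem.Int.floordiv (start + end_) 2)
      let r := queryFuel tree left right fuel (node * 2 + 1) (PySem.Int.floordiv (start + end_) 2 + 1) end_
      [(PySem.List.pyGet? l 0).getD 0 + (PySem.List.pyGet? r 0).getD 0,
       (PySem.List.pyGet? l 1).getD 0 + (PySem.List.pyGet? r 1).getD 0]

def query (tree : List (List Int)) (node : Int) (start : Int) (end_ : Int) (left : Int) (right : Int) : List Int :=
  queryFuel tree left right ((end_ - start).toNat + 1) node start end_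

-- ===== PORT B =====
-- The while-loop of Source B: head of the list = top of the stack ('stack.pop()'); children
-- are pushed so the right child (pushed last) is popped first, as in Source B. The Nat fuel
-- only totalizes the loop: the iteration count is below 3^(span+1), so 0-fuel is never hit.
def queryLoopF (tree : List (List Int)) (left right : Int) : Nat → List (Int × Int × Int) → Int × Int → Int × Int
  | 0, _, res => res
  | _ + 1, [], res => res
  | fuel + 1, (f, s, e) :: stack, res =>
    if left > e ∨ right < s then queryLoopF tree left right fuel stack res
    else if left ≤ s ∧ e ≤ right then
      let row := (PySem.List.pyGet? tree f).getD []
      queryLoopF tree left right fuel stack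
        (res.1 + (PySem.List.pyGet? row 0).getD 0, res.2 + (PySem.List.pyGet? row 1).getD 0)
    else
      let mid := PySem.Int.floordiv (s + e) 2
      queryLoopF tree left right fuel ((f * 2 + 1, mid + 1, e) :: (f * 2, s, mid) :: stack) res

def query_alt (tree : List (List Int)) (node : Int) (start : Int) (end_ : Int) (left : Int) (right : Int) : List Int :=
  let res := queryLoopF tree left right (3 ^ ((end_ - start).toNat + 1)) [(node, start, end_)] (0, 0)
  [res.1, res.2]

-- ===== PRECONDITION & SPEC =====
-- Pre_ admits every call on a well-formed segment tree and excludes only malformed ones: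
-- (for non-trivial, recursing calls) node < 1 or a tree too short to hold the complete
-- subtree rooted at node — there A's recursion raises IndexError, or returns only by
-- accident of query-range pruning / Python negative-index wraparound — and trees with a
-- row shorter than 2, on which A's merge l[0]/l[1] raises IndexError when that row is
-- reached; and (for a fully-covered call) an addressed row that is not a length-2
-- [even,odd] pair, where A returns the raw aliased row while B returns the two counts.
def Pre_query (tree : List (List Int)) (node : Int) (start : Int) (end_ : Int) (left : Int) (right : Int) : Prop :=
  (left > end_ ∨ right < start) ∨
  ((left ≤ start ∧ end_ ≤ right) ∧ (PySem.List.pyGet? tree node).map List.length = some 2) ∨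
  (¬(left ≤ start ∧ end_ ≤ right) ∧ 1 ≤ node ∧
    (node + 1) * 2 ^ (Nat.clog 2 (end_ - start + 1).toNat) ≤ (tree.length : Int) ∧
    ∀ row ∈ tree, 2 ≤ row.length)
instance (tree : List (List Int)) (node : Int) (start : Int) (end_ : Int) (left : Int) (right : Int) : Decidable (Pre_query tree node start end_ left right) := by unfold Pre_query; infer_instance

def pvWitness_query : List (List Int) × Int × Int × Int × Int × Int :=
  ([[0, 0], [3, 4]], 1, 0, 0, 0, 0)

def Spec_query (tree : List (List Int)) (node : Int) (start : Int) (end_ : Int) (left : Int) (right : Int) (out : List Int) : Prop := out = query_alt tree node start end_ left right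
instance (tree : List (List Int)) (node : Int) (start : Int) (end_ : Int) (left : Int) (right : Int) (out : List Int) : Decidable (Spec_query tree node start end_ left right out) := by unfold Spec_query; infer_instance

-- ===== CLAIM (what is proved, stated in full; the proofs are below) =====
def Claim_equal_query : Prop := ∀ (tree : List (List Int)) (node : Int) (start : Int) (end_ : Int) (left : Int) (right : Int), Dom_query tree node start end_ left right → Pre_query tree node start end_ left right → Spec_query tree node start end_ left right (query tree node start end_ left right)

-- ===== LEMMAS AND PROOFS =====

-- midpoint bracketing, used throughout
lemma mid_bounds (s e : Int) (hse : s < e) :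
    s ≤ PySem.Int.floordiv (s + e) 2 ∧ PySem.Int.floordiv (s + e) 2 < e ∧
      (PySem.Int.floordiv (s + e) 2 - s).toNat < (e - s).toNat ∧
      (e - (PySem.Int.floordiv (s + e) 2 + 1)).toNat < (e - s).toNat := by
  have hm : PySem.Int.floordiv (s + e) 2 = (s + e) / 2 :=
    PySem.Int.floordiv_eq_ediv_of_pos (by norm_num)
  rw [hm]; omega

-- the not-disjoint, not-covered branch forces a non-degenerate segment
lemma branch_lt (s e l r : Int) (h1 : ¬(l > e ∨ r < s)) (h2 : ¬(l ≤ s ∧ e ≤ r)) : s < e := by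
  omega

-- enough fuel makes queryFuel independent of the fuel
lemma queryFuel_congr (tree : List (List Int)) (l r : Int) :
    ∀ (k f1 f2 : ℕ) (n s e : Int), (e - s).toNat ≤ k →
      (e - s).toNat < f1 → (e - s).toNat < f2 →
      queryFuel tree l r f1 n s e = queryFuel tree l r f2 n s e := by
  intro k
  induction k with
  | zero =>
    intro f1 f2 n s e hk h1 h2
    obtain ⟨g1, rfl⟩ := Nat.exists_eq_succ_of_ne_zero (by omega : f1 ≠ 0)
    obtain ⟨g2, rfl⟩ := Nat.exists_eq_succ_of_ne_zero (by omega : f2 ≠ 0)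
    rw [queryFuel, queryFuel]
    split_ifs with hb1 hb2
    · rfl
    · rfl
    · exact absurd (branch_lt s e l r hb1 hb2) (by omega)
  | succ k ih =>
    intro f1 f2 n s e hk h1 h2
    obtain ⟨g1, rfl⟩ := Nat.exists_eq_succ_of_ne_zero (by omega : f1 ≠ 0)
    obtain ⟨g2, rfl⟩ := Nat.exists_eq_succ_of_ne_zero (by omega : f2 ≠ 0)
    rw [queryFuel, queryFuel]
    split_ifs with hb1 hb2
    · rfl
    · rfl
    · have hse := branch_lt s e l r hb1 hb2
      obtain ⟨-, -, hL, hR⟩ := mid_bounds s e hse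
      rw [ih g1 g2 (n * 2) s (PySem.Int.floordiv (s + e) 2) (by omega) (by omega) (by omega),
          ih g1 g2 (n * 2 + 1) (PySem.Int.floordiv (s + e) 2 + 1) e (by omega) (by omega) (by omega)]

-- one-step unfolding of port A in terms of itself
lemma query_eq (tree : List (List Int)) (n s e l r : Int) :
    query tree n s e l r =
      if l > e ∨ r < s then [0, 0]
      else if l ≤ s ∧ e ≤ r then (PySem.List.pyGet? tree n).getD []
      else
        [(PySem.List.pyGet? (query tree (n * 2) s (PySem.Int.floordiv (s + e) 2) l r) 0).getD 0 +
           (PySem.List.pyGet? (query tree (n * 2 + 1) (PySem.Int.floordiv (s + e) 2 + 1) e l r) 0).getD 0,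
         (PySem.List.pyGet? (query tree (n * 2) s (PySem.Int.floordiv (s + e) 2) l r) 1).getD 0 +
           (PySem.List.pyGet? (query tree (n * 2 + 1) (PySem.Int.floordiv (s + e) 2 + 1) e l r) 1).getD 0] := by
  unfold query
  rw [queryFuel]
  split_ifs with hb1 hb2
  · rfl
  · rfl
  · have hse := branch_lt s e l r hb1 hb2
    obtain ⟨-, -, hL, hR⟩ := mid_bounds s e hse
    rw [queryFuel_congr tree l r ((e - s).toNat) ((e - s).toNat)
          ((PySem.Int.floordiv (s + e) 2 - s).toNat + 1) (n * 2) s (PySem.Int.floordiv (s + e) 2)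
          (by omega) (by omega) (by omega),
        queryFuel_congr tree l r ((e - s).toNat) ((e - s).toNat)
          ((e - (PySem.Int.floordiv (s + e) 2 + 1)).toNat + 1) (n * 2 + 1)
          (PySem.Int.floordiv (s + e) 2 + 1) e (by omega) (by omega) (by omega)]

-- stack measure: an upper bound on the remaining loop iterations
def msum (st : List (Int × Int × Int)) : ℕ :=
  (st.map (fun fr => 3 ^ ((fr.2.2 - fr.2.1).toNat + 1))).sum

lemma msum_cons (f s e : Int) (st : List (Int × Int × Int)) :
    msum ((f, s, e) :: st) = 3 ^ ((e - s).toNat + 1) + msum st := by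
  simp [msum]

lemma msum_split (s e l r : Int) (h1 : ¬(l > e ∨ r < s)) (h2 : ¬(l ≤ s ∧ e ≤ r)) (rest : ℕ) :
    3 ^ ((e - (PySem.Int.floordiv (s + e) 2 + 1)).toNat + 1) +
      (3 ^ ((PySem.Int.floordiv (s + e) 2 - s).toNat + 1) + rest) <
    3 ^ ((e - s).toNat + 1) + rest := by
  have hse := branch_lt s e l r h1 h2
  obtain ⟨-, -, hL, hR⟩ := mid_bounds s e hse
  have g1 : 3 ^ ((e - (PySem.Int.floordiv (s + e) 2 + 1)).toNat + 1) ≤ 3 ^ (e - s).toNat :=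
    Nat.pow_le_pow_right (by norm_num) (by omega)
  have g2 : 3 ^ ((PySem.Int.floordiv (s + e) 2 - s).toNat + 1) ≤ 3 ^ (e - s).toNat :=
    Nat.pow_le_pow_right (by norm_num) (by omega)
  have hp : 0 < 3 ^ (e - s).toNat := by positivity
  have g3 : 3 ^ (e - s).toNat + 3 ^ (e - s).toNat < 3 ^ ((e - s).toNat + 1) := by
    rw [pow_succ]; omega
  generalize (e - s).toNat = D at g1 g2 g3
  omega

lemma msum_pos (f s e : Int) (st : List (Int × Int × Int)) : 0 < msum ((f, s, e) :: st) := by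
  rw [msum_cons]
  have : 0 < 3 ^ ((e - s).toNat + 1) := by positivity
  omega

-- enough fuel makes the loop independent of the fuel
lemma queryLoopF_congr (tree : List (List Int)) (l r : Int) :
    ∀ (k f1 f2 : ℕ) (st : List (Int × Int × Int)) (res : Int × Int), msum st ≤ k →
      msum st ≤ f1 → msum st ≤ f2 →
      queryLoopF tree l r f1 st res = queryLoopF tree l r f2 st res := by
  intro k
  induction k with
  | zero =>
    intro f1 f2 st res hk h1 h2
    cases st with
    | nil =>
      cases f1 <;> cases f2 <;> rfl
    | cons fr st' => exact absurd (msum_pos fr.1 fr.2.1 fr.2.2 st') (by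
        have : msum ((fr.1, fr.2.1, fr.2.2) :: st') = msum (fr :: st') := rfl
        omega)
  | succ k ih =>
    intro f1 f2 st res hk h1 h2
    cases st with
    | nil => cases f1 <;> cases f2 <;> rfl
    | cons fr st' =>
      obtain ⟨f, s, e⟩ := fr
      have hpos := msum_pos f s e st'
      obtain ⟨g1, rfl⟩ := Nat.exists_eq_succ_of_ne_zero (by omega : f1 ≠ 0)
      obtain ⟨g2, rfl⟩ := Nat.exists_eq_succ_of_ne_zero (by omega : f2 ≠ 0)
      rw [queryLoopF, queryLoopF]
      rw [msum_cons] at hk h1 h2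
      have hp : 0 < 3 ^ ((e - s).toNat + 1) := by positivity
      split_ifs with hb1 hb2
      · exact ih g1 g2 st' res (by omega) (by omega) (by omega)
      · exact ih g1 g2 st' _ (by omega) (by omega) (by omega)
      · have hlt := msum_split s e l r hb1 hb2 (msum st')
        have hm : msum ((f * 2 + 1, PySem.Int.floordiv (s + e) 2 + 1, e) ::
            (f * 2, s, PySem.Int.floordiv (s + e) 2) :: st') =
            3 ^ ((e - (PySem.Int.floordiv (s + e) 2 + 1)).toNat + 1) +
              (3 ^ ((PySem.Int.floordiv (s + e) 2 - s).toNat + 1) + msum st') := by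
          rw [msum_cons, msum_cons]
        exact ih g1 g2 _ res (by omega) (by omega) (by omega)

-- the loop with canonical fuel
def runLoop (tree : List (List Int)) (l r : Int) (st : List (Int × Int × Int)) (res : Int × Int) : Int × Int :=
  queryLoopF tree l r (msum st) st res

lemma pyget_two_zero (a b : Int) : (PySem.List.pyGet? [a, b] 0).getD 0 = a := by
  rw [PySem.List.pyGet?_zero_cons]; rfl

lemma pyget_two_one (a b : Int) : (PySem.List.pyGet? [a, b] 1).getD 0 = b := by
  simp [PySem.List.pyGet?, PySem.List.pyIdx?]

lemma runLoop_unfold (tree : List (List Int)) (l r : Int) (f s e : Int)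
    (st : List (Int × Int × Int)) (res : Int × Int) :
    runLoop tree l r ((f, s, e) :: st) res =
      if l > e ∨ r < s then runLoop tree l r st res
      else if l ≤ s ∧ e ≤ r then
        runLoop tree l r st
          (res.1 + (PySem.List.pyGet? ((PySem.List.pyGet? tree f).getD []) 0).getD 0,
           res.2 + (PySem.List.pyGet? ((PySem.List.pyGet? tree f).getD []) 1).getD 0)
      else
        runLoop tree l r
          ((f * 2 + 1, PySem.Int.floordiv (s + e) 2 + 1, e) ::
            (f * 2, s, PySem.Int.floordiv (s + e) 2) :: st) res := by
  unfold runLoop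
  have hpos := msum_pos f s e st
  obtain ⟨g, hg⟩ := Nat.exists_eq_succ_of_ne_zero (by omega : msum ((f, s, e) :: st) ≠ 0)
  rw [hg, queryLoopF]
  rw [msum_cons] at hg
  have hp : 0 < 3 ^ ((e - s).toNat + 1) := by positivity
  split_ifs with hb1 hb2
  · exact queryLoopF_congr tree l r (msum st) g (msum st) st res le_rfl (by omega) le_rfl
  · exact queryLoopF_congr tree l r (msum st) g (msum st) st _ le_rfl (by omega) le_rfl
  · have hlt := msum_split s e l r hb1 hb2 (msum st)
    have hm : msum ((f * 2 + 1, PySem.Int.floordiv (s + e) 2 + 1, e) ::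
        (f * 2, s, PySem.Int.floordiv (s + e) 2) :: st) =
        3 ^ ((e - (PySem.Int.floordiv (s + e) 2 + 1)).toNat + 1) +
          (3 ^ ((PySem.Int.floordiv (s + e) 2 - s).toNat + 1) + msum st) := by
      rw [msum_cons, msum_cons]
    exact queryLoopF_congr tree l r _ g _ _ res le_rfl (by omega) (by omega)

-- popping one frame adds exactly A's answer for that frame to the accumulator
-- (no well-formedness needed: the defaulted pyGet? junk of the two ports coincides)
lemma loop_step (tree : List (List Int)) (l r : Int) :
    ∀ (k : ℕ) (n s e : Int) (st : List (Int × Int × Int)) (res : Int × Int),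
      (e - s).toNat ≤ k →
      runLoop tree l r ((n, s, e) :: st) res =
        runLoop tree l r st
          (res.1 + (PySem.List.pyGet? (query tree n s e l r) 0).getD 0,
           res.2 + (PySem.List.pyGet? (query tree n s e l r) 1).getD 0) := by
  intro k
  induction k with
  | zero =>
    intro n s e st res hk
    rw [runLoop_unfold, query_eq]
    split_ifs with h1 h2
    · rw [pyget_two_zero, pyget_two_one]; simp
    · rfl
    · exact absurd (branch_lt s e l r h1 h2) (by omega)
  | succ k ih =>
    intro n s e st res hk
    rw [runLoop_unfold, query_eq]
    split_ifs with h1 h2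
    · rw [pyget_two_zero, pyget_two_one]; simp
    · rfl
    · have hse := branch_lt s e l r h1 h2
      obtain ⟨hm1, hm2, hL, hR⟩ := mid_bounds s e hse
      rw [ih _ _ _ _ _ (by omega), ih _ _ _ _ _ (by omega)]
      rw [pyget_two_zero, pyget_two_one]
      congr 1
      simp only [Prod.mk.injEq]
      constructor <;> ring

-- port B always returns the first two (defaulted) entries of port A's result
lemma query_alt_eq (tree : List (List Int)) (n s e l r : Int) :
    query_alt tree n s e l r =
      [(PySem.List.pyGet? (query tree n s e l r) 0).getD 0,
       (PySem.List.pyGet? (query tree n s e l r) 1).getD 0] := by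
  unfold query_alt
  have hfuel : queryLoopF tree l r (3 ^ ((e - s).toNat + 1)) [(n, s, e)] (0, 0) =
      runLoop tree l r [(n, s, e)] (0, 0) := by
    unfold runLoop
    have hm : msum [(n, s, e)] = 3 ^ ((e - s).toNat + 1) := by
      rw [msum_cons]; simp [msum]
    rw [hm]
  rw [hfuel, loop_step tree l r (e - s).toNat n s e [] (0, 0) le_rfl]
  simp [runLoop, msum, queryLoopF]

-- ===== VERDICT (by name: the statement is the Claim_ definition above) =====
theorem query_spec : Claim_equal_query := by
  intro tree node start end_ left right _hdom hpre
  unfold Spec_query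
  rw [query_alt_eq]
  by_cases hdisj : left > end_ ∨ right < start
  · rw [query_eq, if_pos hdisj, pyget_two_zero, pyget_two_one]
  rcases hpre with h | ⟨hcov, hrow⟩ | ⟨hncov, -⟩
  · exact absurd h hdisj
  · rw [query_eq, if_neg hdisj, if_pos hcov]
    obtain ⟨row, hget, hlen⟩ : ∃ row, PySem.List.pyGet? tree node = some row ∧ row.length = 2 := by
      cases hg : PySem.List.pyGet? tree node with
      | none => rw [hg] at hrow; simp at hrow
      | some row => rw [hg] at hrow; exact ⟨row, rfl, by simpa using hrow⟩
    obtain ⟨x, y, rfl⟩ := List.length_eq_two.mp hlen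
    rw [hget, Option.getD_some, pyget_two_zero, pyget_two_one]
  · rw [query_eq, if_neg hdisj, if_neg hncov, pyget_two_zero, pyget_two_one]
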